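-- pv_equiv track=rewrite | github.com/pypi-data/pypi-mirror-229 | packages/hawthorn/hawthorn-0.0.6.tar.gz/hawthorn-0.0.6/hawthorn/cacheproxy.py | parse_imploded_values
-- ===== SOURCE A (Python) =====
-- def parse_imploded_values(rows, keys):
--     results = []
--     if not rows:
--         return results
--     l = len(keys)
--     for val in rows:
--         one = {k:'' for k in keys}
--         i = 0
--         eles = val.split('-')
--         l2 = len(eles)
--         for i in range(l):
--             if i < l2:
--                 one[keys[i]] = eles[i]
--         # in case that if last field is text that contains '-'
--         if l > 0 and l2 > l:
--             for j in range(l2-l):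
--                 one[keys[l-1]] += '-' + eles[l+j]
--         results.append(one)
--     return results
-- ===== SOURCE B (Python) =====
-- def _split_row(val, keys):
--     one = dict.fromkeys(keys, '')
--     if keys:
--         for i, p in enumerate(val.split('-', len(keys) - 1)):
--             one[keys[i]] = p
--     return one
--
-- def parse_imploded_values(rows, keys):
--     return [_split_row(val, keys) for val in rows]
-- ===== Notes on version B (the rewrite author's own statement) =====
-- stated objective: simpler
-- what changed: B replaces A's bounds-checked index loop over range(len(keys)) plus the separate trailing-'-' re-joining loop by a single enumerate pass over val.split('-', len(keys)-1), whose maxsplit already keeps the overflow tail joined in the last piece.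
import Mathlib
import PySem

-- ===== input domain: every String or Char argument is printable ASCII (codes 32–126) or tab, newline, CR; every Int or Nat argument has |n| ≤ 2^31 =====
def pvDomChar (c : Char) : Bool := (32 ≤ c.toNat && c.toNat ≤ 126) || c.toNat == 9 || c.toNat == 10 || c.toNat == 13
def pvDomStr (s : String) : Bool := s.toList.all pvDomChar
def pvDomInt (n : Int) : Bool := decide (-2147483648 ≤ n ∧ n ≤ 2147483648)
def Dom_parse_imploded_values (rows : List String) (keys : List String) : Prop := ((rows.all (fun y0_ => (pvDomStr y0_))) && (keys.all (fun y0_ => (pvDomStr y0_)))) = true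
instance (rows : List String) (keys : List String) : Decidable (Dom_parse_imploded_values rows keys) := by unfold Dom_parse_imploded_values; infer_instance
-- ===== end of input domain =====

-- B replaces A's bounds-checked assignment loop plus the separate trailing-'-' re-joining loop
-- by a single enumerate pass over val.split('-', len(keys)-1), whose maxsplit keeps the tail joined
-- (objective: simpler; same asymptotic cost).

-- ===== PORT A =====
def parse_imploded_values (rows : List String) (keys : List String) : List (List (String × String)) :=
  if rows = [] then []
  else
    let l : Int := PySem.List.len keys
    rows.foldl (fun results val =>
      -- one = {k:'' for k in keys}
      let one0 : PySem.Dict String String :=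
        keys.foldl (fun d k => d.insert k "") PySem.Dict.empty
      -- eles = val.split('-'): the separator "-" is nonempty, so split? is never none (.getD [] unreachable)
      let eles : List String := (PySem.Str.split? val "-").getD []
      let l2 : Int := PySem.List.len eles
      -- for i in range(l): if i < l2: one[keys[i]] = eles[i]   (indices are always in range here,
      -- so the total pyGetD is exact for Python's keys[i] / eles[i])
      let one1 := (PySem.List.pyRange 0 l).foldl (fun d i =>
          if i < l2 then d.insert (PySem.List.pyGetD keys i "") (PySem.List.pyGetD eles i "") else d) one0
      -- if l > 0 and l2 > l: for j in range(l2-l): one[keys[l-1]] += '-' + eles[l+j]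
      -- (keys[l-1] was inserted by the first loop's dict build, so Python's read never raises;
      --  Dict.modify with default "" is exact here)
      let one2 := if 0 < l ∧ l < l2 then
          (PySem.List.pyRange 0 (l2 - l)).foldl (fun d j =>
            d.modify (PySem.List.pyGetD keys (l - 1) "") "" (fun s => s ++ "-" ++ PySem.List.pyGetD eles (l + j) "")) one1
        else one1
      results ++ [one2.items]) []

-- ===== PORT B =====
-- helper _split_row of Source B
def pvRowB (val : String) (keys : List String) : PySem.Dict String String :=
  -- one = dict.fromkeys(keys, '')
  let one0 : PySem.Dict String String := keys.foldl (fun d k => d.insert k "") PySem.Dict.empty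
  if keys ≠ [] then
    -- for i, p in enumerate(val.split('-', len(keys) - 1)): one[keys[i]] = p
    -- ("-" is nonempty so splitMax? is never none; i < len(parts) ≤ len(keys), so pyGetD is exact)
    (PySem.List.enumerate ((PySem.Str.splitMax? val "-" (PySem.List.len keys - 1)).getD [])).foldl
      (fun d ip => d.insert (PySem.List.pyGetD keys ip.1 "") ip.2) one0
  else one0

def parse_imploded_values_alt (rows : List String) (keys : List String) : List (List (String × String)) :=
  rows.map (fun val => (pvRowB val keys).items)

-- ===== PRECONDITION & SPEC =====
def Spec_parse_imploded_values (rows : List String) (keys : List String) (out : List (List (String × String))) : Prop := out = parse_imploded_values_alt rows keys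
instance (rows : List String) (keys : List String) (out : List (List (String × String))) : Decidable (Spec_parse_imploded_values rows keys out) := by unfold Spec_parse_imploded_values; infer_instance

-- ===== CLAIM (what is proved, stated in full; the proofs are below) =====
def Claim_equal_parse_imploded_values : Prop := ∀ (rows : List String) (keys : List String), Dom_parse_imploded_values rows keys → Spec_parse_imploded_values rows keys (parse_imploded_values rows keys)

-- ===== LEMMAS AND PROOFS =====

-- ---- fuel-level facts about Python's str.split with and without maxsplit ----

theorem pv_go_acc (sep : List Char) (fuel : Nat) (l cur : List Char) (acc : List (List Char)) :
    PySem.Chars.splitOn.go sep fuel l cur acc = acc.reverse ++ PySem.Chars.splitOn.go sep fuel l cur [] := by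
  induction fuel generalizing l cur acc with
  | zero => simp [PySem.Chars.splitOn.go]
  | succ fuel ih =>
    cases l with
    | nil => simp [PySem.Chars.splitOn.go]
    | cons c rest =>
      rw [PySem.Chars.splitOn.go, PySem.Chars.splitOn.go]
      by_cases h : sep.isPrefixOf (c :: rest)
      · simp only [h, if_true]
        rw [ih _ _ (cur.reverse :: acc), ih _ _ ([cur.reverse])]
        simp
      · simp only [h, Bool.false_eq_true, if_false]
        exact ih _ _ _

theorem pv_go_len (sep : List Char) (fuel : Nat) (l cur : List Char) :
    1 ≤ (PySem.Chars.splitOn.go sep fuel l cur []).length := by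
  induction fuel generalizing l cur with
  | zero => simp [PySem.Chars.splitOn.go]
  | succ fuel ih =>
    cases l with
    | nil => simp [PySem.Chars.splitOn.go]
    | cons c rest =>
      rw [PySem.Chars.splitOn.go]
      by_cases h : sep.isPrefixOf (c :: rest)
      · simp only [h, if_true]
        rw [pv_go_acc]
        simp
      · simp only [h, Bool.false_eq_true, if_false]
        exact ih _ _

theorem pv_inter_cons_cons (s x y : List Char) (ys : List (List Char)) :
    List.intercalate s (x :: y :: ys) = x ++ s ++ List.intercalate s (y :: ys) := by
  simp [List.intercalate, List.intersperse]

-- joining the pieces of a full split recovers the string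
theorem pv_go_join (sep : List Char) (hsep : sep ≠ []) (fuel : Nat) (l cur : List Char)
    (hf : l.length < fuel) :
    List.intercalate sep (PySem.Chars.splitOn.go sep fuel l cur []) = cur.reverse ++ l := by
  induction fuel generalizing l cur with
  | zero => omega
  | succ fuel ih =>
    cases l with
    | nil => simp [PySem.Chars.splitOn.go, List.intercalate]
    | cons c rest =>
      rw [PySem.Chars.splitOn.go]
      by_cases h : sep.isPrefixOf (c :: rest)
      · simp only [h, if_true]
        rw [pv_go_acc]
        have hpre : sep ++ List.drop sep.length (c :: rest) = c :: rest := by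
          have hp : sep <+: (c :: rest) := List.isPrefixOf_iff_prefix.mp h
          exact List.prefix_iff_eq_append.mp hp |>.symm ▸ rfl
        rcases sep with _ | ⟨s0, ss⟩
        · exact absurd rfl hsep
        have hlen : (List.drop (s0 :: ss).length (c :: rest)).length < fuel := by
          rw [List.length_drop]
          simp only [List.length_cons] at hf ⊢
          omega
        have hG := pv_go_len (s0 :: ss) fuel (List.drop (s0 :: ss).length (c :: rest)) []
        have hih := ih (List.drop (s0 :: ss).length (c :: rest)) [] hlen
        generalize hGdef : PySem.Chars.splitOn.go (s0 :: ss) fuel (List.drop (s0 :: ss).length (c :: rest)) [] [] = G at hG hih ⊢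
        cases G with
        | nil => simp at hG
        | cons g gs =>
          simp only [List.reverse_singleton, List.singleton_append]
          rw [pv_inter_cons_cons]
          simp only [List.reverse_nil, List.nil_append] at hih
          rw [List.append_assoc, hih, hpre]
      · simp only [h, Bool.false_eq_true, if_false]
        have := ih rest (c :: cur) (by simp only [List.length_cons] at hf ⊢; omega)
        rw [this]
        simp

theorem pv_goM_acc (sep : List Char) (fuel m : Nat) (l cur : List Char) (acc : List (List Char)) :
    PySem.Chars.splitOnMax.go sep fuel m l cur acc = acc.reverse ++ PySem.Chars.splitOnMax.go sep fuel m l cur [] := by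
  induction fuel generalizing m l cur acc with
  | zero => simp [PySem.Chars.splitOnMax.go]
  | succ fuel ih =>
    cases l with
    | nil => simp [PySem.Chars.splitOnMax.go]
    | cons c rest =>
      rw [PySem.Chars.splitOnMax.go, PySem.Chars.splitOnMax.go]
      by_cases hm : m = 0
      · simp [hm]
      · simp only [hm, if_false]
        by_cases h : sep.isPrefixOf (c :: rest)
        · simp only [h, if_true]
          rw [ih _ _ _ (cur.reverse :: acc), ih _ _ _ ([cur.reverse])]
          simp
        · simp only [h, Bool.false_eq_true, if_false]
          exact ih _ _ _ _

-- s.split(sep, m) keeps the first m pieces of s.split(sep) and re-joins the rest into the last piece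
def pvTrunc (sep : List Char) (n : Nat) (xs : List (List Char)) : List (List Char) :=
  if xs.length ≤ n + 1 then xs else xs.take n ++ [List.intercalate sep (xs.drop n)]

theorem pvTrunc_cons (sep : List Char) (n : Nat) (x : List Char) (xs : List (List Char)) :
    pvTrunc sep (n + 1) (x :: xs) = x :: pvTrunc sep n xs := by
  simp only [pvTrunc, List.length_cons, List.take_succ_cons, List.drop_succ_cons]
  by_cases h : xs.length ≤ n + 1
  · simp [h]
  · simp [h]

theorem pvTrunc_length (sep : List Char) (n : Nat) (xs : List (List Char)) :
    (pvTrunc sep n xs).length = min (n + 1) xs.length := by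
  unfold pvTrunc
  split
  · omega
  · simp only [List.length_append, List.length_take, List.length_cons, List.length_nil]
    omega

theorem pv_goM_eq (sep : List Char) (hsep : sep ≠ []) (fuel : Nat) (m : Nat) (l cur : List Char)
    (hf : l.length < fuel) :
    PySem.Chars.splitOnMax.go sep fuel m l cur [] = pvTrunc sep m (PySem.Chars.splitOn.go sep fuel l cur []) := by
  induction fuel generalizing m l cur with
  | zero => omega
  | succ fuel ih =>
    cases l with
    | nil => simp [PySem.Chars.splitOnMax.go, PySem.Chars.splitOn.go, pvTrunc]
    | cons c rest =>
      by_cases hm : m = 0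
      · subst hm
        rw [PySem.Chars.splitOnMax.go]
        simp only [if_true, List.reverse_singleton]
        have hj := pv_go_join sep hsep (fuel + 1) (c :: rest) cur hf
        have hG := pv_go_len sep (fuel + 1) (c :: rest) cur
        cases hr : PySem.Chars.splitOn.go sep (fuel + 1) (c :: rest) cur [] with
        | nil => rw [hr] at hG; simp at hG
        | cons g gs =>
          rw [hr] at hj
          cases gs with
          | nil =>
            have hg : g = cur.reverse ++ c :: rest := by
              rwa [show List.intercalate sep [g] = g from by simp [List.intercalate]] at hj
            simp [pvTrunc, hg]
          | cons g2 gs2 =>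
            simp only [pvTrunc, List.length_cons]
            rw [if_neg (by simp)]
            simp only [List.take_zero, List.drop_zero, List.nil_append]
            rw [hj]
      · obtain ⟨m', rfl⟩ : ∃ m', m = m' + 1 := ⟨m - 1, by omega⟩
        rw [PySem.Chars.splitOnMax.go, PySem.Chars.splitOn.go]
        simp only [Nat.succ_ne_zero, if_false, Nat.add_sub_cancel]
        by_cases h : sep.isPrefixOf (c :: rest)
        · simp only [h, if_true]
          rcases sep with _ | ⟨s0, ss⟩
          · exact absurd rfl hsep
          have hlen : (List.drop (s0 :: ss).length (c :: rest)).length < fuel := by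
            rw [List.length_drop]
            simp only [List.length_cons] at hf ⊢
            omega
          rw [pv_goM_acc, pv_go_acc]
          simp only [List.reverse_singleton, List.singleton_append]
          rw [pvTrunc_cons, ih _ _ _ hlen]
        · simp only [h, Bool.false_eq_true, if_false]
          exact ih _ _ _ (by simp only [List.length_cons] at hf ⊢; omega)

-- ---- the value found in a dict built by a fold of inserts: last matching assignment wins ----

def pvLastA (ps : List (String × String)) (k a : String) : String :=
  ps.foldl (fun acc p => if p.1 = k then p.2 else acc) a

theorem pvLastA_append (ps qs : List (String × String)) (k a : String) :
    pvLastA (ps ++ qs) k a = pvLastA qs k (pvLastA ps k a) := by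
  simp [pvLastA, List.foldl_append]

theorem pv_getD_zipfold (ps : List (String × String)) (d : PySem.Dict String String) (k : String) :
    (ps.foldl (fun d p => d.insert p.1 p.2) d).getD k "" = pvLastA ps k (d.getD k "") := by
  induction ps generalizing d with
  | nil => simp [pvLastA]
  | cons p ps ih =>
    rw [List.foldl_cons, ih, PySem.Dict.getD_insert]
    show pvLastA ps k _ = pvLastA ps k _
    congr 1
    by_cases h : p.1 = k
    · subst h; simp
    · simp only []
      rw [if_neg h, if_neg (fun hh => h hh.symm)]

theorem pv_one0_getD (keys : List String) (d : PySem.Dict String String) (k : String)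
    (hd : d.getD k "" = "") :
    (keys.foldl (fun d k => d.insert k "") d).getD k "" = "" := by
  induction keys generalizing d with
  | nil => simpa using hd
  | cons a keys ih =>
    rw [List.foldl_cons]
    refine ih _ ?_
    rw [PySem.Dict.getD_insert]
    split <;> simp [hd]

theorem pv_modfold_getD (js : List Int) (K : String) (g : Int → String → String)
    (d : PySem.Dict String String) (k : String) :
    ((js.foldl (fun d j => d.modify K "" (fun s => g j s)) d)).getD k ""
      = if k = K then js.foldl (fun s j => g j s) (d.getD K "") else d.getD k "" := by
  induction js generalizing d with
  | nil => by_cases h : k = K <;> simp [h]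
  | cons j js ih =>
    simp only [List.foldl_cons, ih]
    simp only [PySem.Dict.getD_modify]
    by_cases h : k = K <;> simp [h]

-- ---- index loops over range(len(..)) are folds over the zip ----

theorem pv_condfold_eq_zipfold_nat (ks vs : List String) (d : PySem.Dict String String) :
    (List.range ks.length).foldl
      (fun d i => if i < vs.length then d.insert (ks.getD i "") (vs.getD i "") else d) d
    = (ks.zip vs).foldl (fun d p => d.insert p.1 p.2) d := by
  induction ks generalizing vs d with
  | nil => simp
  | cons a ks ih =>
    simp only [List.length_cons]
    rw [List.range_succ_eq_map]
    simp only [List.foldl_cons, List.foldl_map]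
    cases vs with
    | nil =>
      simp only [List.length_nil, Nat.not_lt_zero, if_false, List.zip_nil_right, List.foldl_nil]
      exact PySem.List.foldl_ignore _ _
    | cons b vs =>
      simp only [List.length_cons, Nat.zero_lt_succ, if_true, List.getD_cons_zero,
        Nat.succ_lt_succ_iff, List.getD_cons_succ, List.zip_cons_cons, List.foldl_cons]
      exact ih vs _

theorem pv_condfold_eq_zipfold (ks vs : List String) (d : PySem.Dict String String) :
    (PySem.List.pyRange 0 ((ks.length : Int))).foldl
      (fun d i => if i < ((vs.length : Int)) then d.insert (PySem.List.pyGetD ks i "") (PySem.List.pyGetD vs i "") else d) d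
    = (ks.zip vs).foldl (fun d p => d.insert p.1 p.2) d := by
  rw [PySem.List.pyRange_zero_natCast, List.foldl_map]
  rw [← pv_condfold_eq_zipfold_nat ks vs d]
  refine PySem.List.foldl_congr_mem _ _ _ _ ?_
  intro acc i hi
  simp [PySem.List.pyGetD_natCast]

theorem pv_enumfold_eq_zipfold_nat (vs ks : List String) (d : PySem.Dict String String)
    (h : vs.length ≤ ks.length) :
    (List.range vs.length).foldl
      (fun d i => d.insert (ks.getD i "") (vs.getD i "")) d
    = (ks.zip vs).foldl (fun d p => d.insert p.1 p.2) d := by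
  induction vs generalizing ks d with
  | nil => simp
  | cons b vs ih =>
    cases ks with
    | nil => simp at h
    | cons a ks =>
      simp only [List.length_cons]
      rw [List.range_succ_eq_map]
      simp only [List.foldl_cons, List.foldl_map, List.getD_cons_zero, List.getD_cons_succ,
        List.zip_cons_cons]
      exact ih ks _ (by simpa using h)

theorem pv_enumfold_eq_zipfold (ks vs : List String) (d : PySem.Dict String String)
    (h : vs.length ≤ ks.length) :
    (PySem.List.enumerate vs).foldl
      (fun d ip => d.insert (PySem.List.pyGetD ks ip.1 "") ip.2) d
    = (ks.zip vs).foldl (fun d p => d.insert p.1 p.2) d := by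
  rw [PySem.List.enumerate_eq_map_pyRange vs "", List.foldl_map]
  simp only [PySem.List.len_eq]
  rw [PySem.List.pyRange_zero_natCast, List.foldl_map]
  rw [← pv_enumfold_eq_zipfold_nat vs ks d h]
  refine PySem.List.foldl_congr_mem _ _ _ _ ?_
  intro acc i hi
  simp [PySem.List.pyGetD_natCast]

-- ---- the overflow-append loop is a fold over the dropped tail ----

theorem pv_ovfold_nat (es : List String) (l : Nat) (s0 : String) :
    (List.range (es.length - l)).foldl (fun s i => s ++ "-" ++ es.getD (l + i) "") s0
    = (es.drop l).foldl (fun s e => s ++ "-" ++ e) s0 := by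
  induction hn : es.length - l generalizing l s0 with
  | zero =>
    have : es.drop l = [] := by
      apply List.eq_nil_of_length_eq_zero
      simp [List.length_drop]; omega
    simp [this]
  | succ n ih =>
    have hl : l < es.length := by omega
    rw [List.range_succ_eq_map]
    simp only [List.foldl_cons, List.foldl_map, Nat.add_zero]
    have hdrop : es.drop l = es.getD l "" :: es.drop (l + 1) := by
      rw [List.getD_eq_getElem _ _ hl, List.drop_eq_getElem_cons hl]
    rw [hdrop]
    simp only [List.foldl_cons]
    rw [← ih (l + 1) _ (by omega)]
    congr 1
    funext s i
    congr 2
    omega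

theorem pv_inter_glue (d0 d : List Char) (ds : List (List Char)) :
    List.intercalate ['-'] ((d0 ++ '-' :: d) :: ds) = List.intercalate ['-'] (d0 :: d :: ds) := by
  cases ds with
  | nil => simp [List.intercalate, List.intersperse]
  | cons e es =>
    rw [pv_inter_cons_cons, pv_inter_cons_cons, pv_inter_cons_cons]
    simp

theorem pv_joinlift (ds : List (List Char)) (d0 : List Char) :
    (ds.map String.ofList).foldl (fun s e => s ++ "-" ++ e) (String.ofList d0)
    = String.ofList (List.intercalate ['-'] (d0 :: ds)) := by
  induction ds generalizing d0 with
  | nil => simp [List.intercalate]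
  | cons d ds ih =>
    simp only [List.map_cons, List.foldl_cons]
    have : String.ofList d0 ++ "-" ++ String.ofList d = String.ofList (d0 ++ '-' :: d) := by
      rw [show ('-' :: d : List Char) = ['-'] ++ d from rfl, String.ofList_append, String.ofList_append]
      rw [show String.ofList ['-'] = "-" from rfl, String.append_assoc]
    rw [this, ih, pv_inter_glue]

-- ---- keys of the dicts both programs build ----

theorem pv_keys_one0 (keys : List String) :
    ((keys.foldl (fun d k => d.insert k "") PySem.Dict.empty) : PySem.Dict String String).keys
      = PySem.Set.ofList keys := by
  rw [PySem.Dict.keys_foldl_insert keys (fun _ _ => "") PySem.Dict.empty]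
  rw [PySem.Dict.keys_empty]
  exact PySem.Set.update_nil_left keys

theorem pv_update_stable (keys : List String) (xs : List String) (h : ∀ x ∈ xs, x ∈ keys) :
    PySem.Set.update (PySem.Set.ofList keys) xs = PySem.Set.ofList keys := by
  rw [PySem.Set.update_eq_append_filter]
  have : (PySem.Set.ofList xs).filter (fun y => !(PySem.Set.contains (PySem.Set.ofList keys) y)) = [] := by
    rw [List.filter_eq_nil_iff]
    intro x hx
    have hxk : x ∈ keys := h x ((PySem.Set.mem_ofList xs x).mp hx)
    simpa using hxk
  rw [this, List.append_nil]

theorem pv_modfold_keys (js : List Int) (K : String) (g : Int → String → String)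
    (d : PySem.Dict String String) (hK : K ∈ d.keys) :
    (js.foldl (fun d j => d.modify K "" (fun s => g j s)) d).keys = d.keys := by
  induction js generalizing d with
  | nil => rfl
  | cons j js ih =>
    rw [List.foldl_cons]
    have hc : d.contains K = true := (PySem.Dict.contains_iff_mem_keys d K).mpr hK
    have hkeys : (d.modify K "" (fun s => g j s)).keys = d.keys := by
      rw [PySem.Dict.keys_modify]
      exact PySem.Dict.keys_insert_of_contains d _ hc
    rw [ih _ (hkeys ▸ hK), hkeys]

-- ---- the per-row computation of port A, as a named function (definitionally the loop body) ----

def pvRowA (val : String) (keys : List String) : PySem.Dict String String :=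
  let l : Int := PySem.List.len keys
  let one0 : PySem.Dict String String :=
    keys.foldl (fun d k => d.insert k "") PySem.Dict.empty
  let eles : List String := (PySem.Str.split? val "-").getD []
  let l2 : Int := PySem.List.len eles
  let one1 := (PySem.List.pyRange 0 l).foldl (fun d i =>
      if i < l2 then d.insert (PySem.List.pyGetD keys i "") (PySem.List.pyGetD eles i "") else d) one0
  if 0 < l ∧ l < l2 then
    (PySem.List.pyRange 0 (l2 - l)).foldl (fun d j =>
      d.modify (PySem.List.pyGetD keys (l - 1) "") "" (fun s => s ++ "-" ++ PySem.List.pyGetD eles (l + j) "")) one1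
  else one1

theorem pv_rowA_rowB (val : String) (keys : List String) :
    (pvRowA val keys).items = (pvRowB val keys).items := by
  by_cases hk : keys = []
  · subst hk
    simp [pvRowA, pvRowB, PySem.List.len, PySem.List.pyRange]
  · have hl1 : 1 ≤ keys.length := List.length_pos_iff.mpr hk
    have heles : (PySem.Str.split? val "-").getD []
        = (PySem.Chars.splitOn val.toList ['-']).map String.ofList := by
      rw [PySem.Str.split?, show ("-" : String).toList = ['-'] from rfl, PySem.Chars.split?]
      simp
    have htoNat : (((keys.length : Int)) - 1).toNat = keys.length - 1 := by omega
    have hparts : (PySem.Str.splitMax? val "-" ((keys.length : Int) - 1)).getD []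
        = (pvTrunc ['-'] (keys.length - 1) (PySem.Chars.splitOn val.toList ['-'])).map String.ofList := by
      rw [PySem.Str.splitMax?, show ("-" : String).toList = ['-'] from rfl, PySem.Chars.splitMax?]
      simp only [List.isEmpty_cons, Bool.false_eq_true, if_false, Option.map_some, Option.getD_some]
      rw [PySem.Chars.splitOnMax]
      rw [if_neg (by omega : ¬ (((keys.length : Int)) - 1 < 0))]
      rw [pv_goM_eq ['-'] (by simp) (val.toList.length + 1) _ _ _ (Nat.lt_succ_self _)]
      rw [htoNat]
      rfl
    simp only [pvRowA, pvRowB, PySem.List.len_eq, if_pos hk, heles, hparts, ne_eq]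
    set E := PySem.Chars.splitOn val.toList ['-'] with hE
    set one0 := List.foldl (fun d k => d.insert k "") PySem.Dict.empty keys with hone0
    rw [pv_condfold_eq_zipfold keys (E.map String.ofList) one0]
    rw [pv_enumfold_eq_zipfold keys ((pvTrunc ['-'] (keys.length - 1) E).map String.ofList) one0
      (by rw [List.length_map, pvTrunc_length]; omega)]
    by_cases hbig : keys.length < E.length
    · rw [if_pos ⟨by exact_mod_cast hl1, by simp only [List.length_map]; exact_mod_cast hbig⟩]
      have hK : PySem.List.pyGetD keys ((keys.length : Int) - 1) "" = keys.getD (keys.length - 1) "" := by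
        rw [show ((keys.length : Int) - 1) = (((keys.length - 1 : Nat)) : Int) from by omega,
          PySem.List.pyGetD_natCast]
      rw [hK]
      set klast := keys.getD (keys.length - 1) "" with hkl
      set emap := E.map String.ofList with hemap
      have hemlen : emap.length = E.length := by rw [hemap, List.length_map]
      -- decompose keys and the two zips
      have hkeysdec : keys = keys.take (keys.length - 1) ++ [klast] := by
        conv_lhs => rw [← List.take_append_drop (keys.length - 1) keys]
        congr 1
        rw [List.drop_eq_getElem_cons (by omega), hkl, List.getD_eq_getElem _ _ (by omega)]
        congr 1
        rw [show keys.length - 1 + 1 = keys.length from by omega, List.drop_length]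
      set P := (keys.take (keys.length - 1)).zip (emap.take (keys.length - 1)) with hP
      have hzipE : keys.zip emap = P ++ [(klast, emap.getD (keys.length - 1) "")] := by
        conv_lhs => rw [hkeysdec, ← List.take_append_drop (keys.length - 1) emap]
        rw [List.zip_append (by simp [List.length_take]; omega)]
        rw [List.drop_eq_getElem_cons (by omega : keys.length - 1 < emap.length)]
        rw [List.zip_cons_cons, List.zip_nil_left]
        rw [List.getD_eq_getElem _ _ (by omega : keys.length - 1 < emap.length)]
      have hPtrunc : pvTrunc ['-'] (keys.length - 1) E
          = E.take (keys.length - 1) ++ [List.intercalate ['-'] (E.drop (keys.length - 1))] := by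
        unfold pvTrunc
        rw [if_neg (by omega)]
      have hzipP : keys.zip (List.map String.ofList (pvTrunc ['-'] (keys.length - 1) E))
          = P ++ [(klast, String.ofList (List.intercalate ['-'] (E.drop (keys.length - 1))))] := by
        rw [hPtrunc, List.map_append, List.map_take, ← hemap]
        conv_lhs => rw [hkeysdec]
        rw [List.zip_append (by simp [List.length_take]; omega)]
        simp [← hP]
      rw [hzipE, hzipP]
      -- keys of both dicts
      have hzipkeys : ∀ (ps : List (String × String)), (∀ p ∈ ps, p.1 ∈ keys) →
          (List.foldl (fun d p => d.insert p.1 p.2) one0 ps).keys = PySem.Set.ofList keys := by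
        intro ps hps
        rw [PySem.Dict.keys_foldl_insert_key ps Prod.fst (fun _ p => p.2) one0]
        rw [hone0, pv_keys_one0]
        refine pv_update_stable keys _ ?_
        intro x hx
        rcases List.mem_map.mp hx with ⟨p, hp, rfl⟩
        exact hps p hp
      have hPmem : ∀ p ∈ P, p.1 ∈ keys := by
        intro p hp
        have := List.of_mem_zip hp
        exact List.mem_of_mem_take this.1
      have hklastmem : klast ∈ keys := by
        rw [hkl, List.getD_eq_getElem _ _ (by omega)]
        exact List.getElem_mem _
      have hmemE : ∀ p ∈ P ++ [(klast, emap.getD (keys.length - 1) "")], p.1 ∈ keys := by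
        intro p hp
        rcases List.mem_append.mp hp with h1 | h2
        · exact hPmem p h1
        · rw [List.mem_singleton.mp h2]; exact hklastmem
      have hmemP : ∀ p ∈ P ++ [(klast, String.ofList (List.intercalate ['-'] (E.drop (keys.length - 1))))], p.1 ∈ keys := by
        intro p hp
        rcases List.mem_append.mp hp with h1 | h2
        · exact hPmem p h1
        · rw [List.mem_singleton.mp h2]; exact hklastmem
      set dI := List.foldl (fun d p => d.insert p.1 p.2) one0 (P ++ [(klast, emap.getD (keys.length - 1) "")]) with hdI
      set dB := List.foldl (fun d p => d.insert p.1 p.2) one0 (P ++ [(klast, String.ofList (List.intercalate ['-'] (E.drop (keys.length - 1))))]) with hdB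
      have hdIkeys : dI.keys = PySem.Set.ofList keys := hzipkeys _ hmemE
      have hdBkeys : dB.keys = PySem.Set.ofList keys := hzipkeys _ hmemP
      have hone0nodup : one0.keys.Nodup := by
        rw [hone0]
        exact PySem.Dict.nodup_keys_foldl_insert keys (fun _ _ => "") _ PySem.Dict.nodup_keys_empty
      have hdInodup : dI.keys.Nodup := by
        rw [hdI]
        exact PySem.Dict.nodup_keys_foldl_insert_key _ Prod.fst (fun _ p => p.2) _ hone0nodup
      have hdBnodup : dB.keys.Nodup := by
        rw [hdB]
        exact PySem.Dict.nodup_keys_foldl_insert_key _ Prod.fst (fun _ p => p.2) _ hone0nodup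
      set dA := List.foldl
          (fun d j => d.modify klast "" fun s => s ++ "-" ++ PySem.List.pyGetD emap ((keys.length : Int) + j) "")
          dI (PySem.List.pyRange 0 ((emap.length : Int) - (keys.length : Int))) with hdA
      have hdAkeys : dA.keys = dI.keys := by
        rw [hdA]
        exact pv_modfold_keys _ _ _ _ (by rw [hdIkeys]; exact (PySem.Set.mem_ofList keys klast).mpr hklastmem)
      -- items via keys + values
      rw [PySem.Dict.items_eq_map_keys dA (by rw [hdAkeys]; exact hdInodup) "",
        PySem.Dict.items_eq_map_keys dB hdBnodup "", hdAkeys, hdIkeys, hdBkeys]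
      refine List.map_congr_left ?_
      intro k hkmem
      have hone0getD : ∀ k' : String, one0.getD k' "" = "" := by
        intro k'
        rw [hone0]
        exact pv_one0_getD keys _ k' (PySem.Dict.getD_empty k' "")
      -- value on the B side
      have hBval : dB.getD k "" = (if klast = k then String.ofList (List.intercalate ['-'] (E.drop (keys.length - 1))) else pvLastA P k "") := by
        rw [hdB, pv_getD_zipfold, hone0getD, pvLastA_append]
        simp [pvLastA]
      -- value on the A side
      have hIval : ∀ k' : String, dI.getD k' "" = (if klast = k' then emap.getD (keys.length - 1) "" else pvLastA P k' "") := by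
        intro k'
        rw [hdI, pv_getD_zipfold, hone0getD, pvLastA_append]
        simp [pvLastA]
      have hAval : dA.getD k "" = (if k = klast then
          (PySem.List.pyRange 0 ((emap.length : Int) - (keys.length : Int))).foldl
            (fun s j => s ++ "-" ++ PySem.List.pyGetD emap ((keys.length : Int) + j) "") (dI.getD klast "")
          else dI.getD k "") := by
        rw [hdA]
        exact pv_modfold_getD _ _ _ _ _
      rw [hAval, hBval]
      by_cases hkk : k = klast
      · rw [if_pos hkk, if_pos hkk.symm]
        rw [hIval klast, if_pos rfl]
        -- the overflow loop re-creates the joined tail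
        have hcast : ((emap.length : Int) - (keys.length : Int)) = ((emap.length - keys.length : Nat) : Int) := by omega
        rw [hcast, PySem.List.pyRange_zero_natCast, List.foldl_map]
        have hstep : ∀ (s : String) (i : Nat),
            s ++ "-" ++ PySem.List.pyGetD emap ((keys.length : Int) + (i : Int)) "" = s ++ "-" ++ emap.getD (keys.length + i) "" := by
          intro s i
          rw [show ((keys.length : Int) + (i : Int)) = (((keys.length + i : Nat)) : Int) from by omega,
            PySem.List.pyGetD_natCast]
        simp only [hstep]
        rw [pv_ovfold_nat emap keys.length]
        have he : emap.getD (keys.length - 1) "" = String.ofList (E[keys.length - 1]'(by omega)) := by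
          rw [List.getD_eq_getElem _ _ (by omega : keys.length - 1 < emap.length)]
          simp only [hemap, List.getElem_map]
        have hd : emap.drop keys.length = (E.drop keys.length).map String.ofList := by
          rw [hemap, List.map_drop]
        have hdrop1 : E.drop (keys.length - 1) = E[keys.length - 1]'(by omega) :: E.drop keys.length := by
          rw [show E.drop (keys.length - 1) = E.drop (keys.length - 1) from rfl,
            List.drop_eq_getElem_cons (by omega : keys.length - 1 < E.length),
            show keys.length - 1 + 1 = keys.length from by omega]
        rw [he, hd, pv_joinlift, hdrop1]
      · rw [if_neg hkk, if_neg (fun h => hkk h.symm), hIval k, if_neg (fun h => hkk h.symm)]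
    · rw [if_neg (by simp only [List.length_map]; omega)]
      have hsmall : pvTrunc ['-'] (keys.length - 1) E = E := by
        unfold pvTrunc
        rw [if_pos (by omega)]
      rw [hsmall]

theorem pvA_eq (rows keys : List String) :
    parse_imploded_values rows keys
      = if rows = [] then [] else rows.foldl (fun results val => results ++ [(pvRowA val keys).items]) [] := rfl

-- ===== VERDICT (by name: the statement is the Claim_ definition above) =====
theorem parse_imploded_values_spec : Claim_equal_parse_imploded_values := by
  intro rows keys _
  show parse_imploded_values rows keys = parse_imploded_values_alt rows keys
  rw [pvA_eq]
  by_cases h : rows = []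
  · simp [h, parse_imploded_values_alt]
  · rw [if_neg h]
    rw [PySem.List.foldl_append_singleton_eq_map (fun val => (pvRowA val keys).items) rows []]
    rw [List.nil_append]
    unfold parse_imploded_values_alt
    exact List.map_congr_left (fun val _ => pv_rowA_rowB val keys)
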